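-- pv_equiv track=rewrite | github.com/MaT1g3R/csc148 | labs/lab11/timsort.py | find_runs3
-- ===== SOURCE A (Python) =====
-- def find_runs3(lst):
--     """Same as find_runs2, but each run (except the last one)
--     must be of length >= 32.
--
--     Precondition: len(lst) > 0
--
--     @type lst: list
--     @rtype: list[(int, int)]
--     >>> find_runs3([1, 4, 7, 10, 2, 5, 3, -1])
--     [(6, 8)]
--     >>> find_runs3([0, 1, 2, 3, 4, 5])
--     [(0, 6)]
--     >>> find_runs3([10, 4, -2, 1])
--     [(3, 4)]
--     >>> find_runs3([0, 1, 2, 3, 4, 5, 6, 7, 8, 9, 10, 11, 12, 13, 14, 15, 16, 17, 18, 19, 20, 21, 22, 23, 24, 25, 26, 27, 28, 29, 30, 31, -10])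
--     [(0, 32), (32, 33)]
--     """
--     runs = []
--     start = 0
--     end = 1
--     while end < len(lst):
--         acending = False
--         if lst[end] >= lst[start]:
--             acending = True
--
--         while acending and end < len(lst):
--             if lst[end] >= lst[end - 1]:
--                 end += 1
--             else:
--                 if end - start >= 32:
--                     runs.append((start, end))
--                 start = end
--                 end += 1
--                 break
--
--         while not acending and end < len(lst):
--             if lst[end] < lst[end - 1]:
--                 end += 1
--             else:
--                 if end - start >= 32:
--                     runs.append((start, end))
--                 start = end
--                 end += 1
--                 break
--
--     runs.append((start, end))
--     return runs
-- ===== SOURCE B (Python) =====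
-- def find_runs3(lst):
--     # Reformulation: a pair (i, i+1) is "up" iff lst[i+1] >= lst[i]; a maximal run
--     # is then determined purely by this boolean sequence: a run starting at s takes
--     # its direction from up[s] and ends right after the first index c > s where the
--     # bit flips (up[c] != up[c-1]), consuming bits s..c-1 and discarding the
--     # breaking bit c; the next run starts at c+1.  So we precompute the bit list
--     # and its change points, then derive the runs by jumping between change points,
--     # and finally filter non-final runs by length >= 32.
--     n = len(lst)
--     if n == 0:
--         return []
--     up = [lst[i + 1] >= lst[i] for i in range(n - 1)]
--     changes = [i for i in range(1, n - 1) if up[i] != up[i - 1]]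
--
--     def build(s, cs):
--         if not cs:
--             return [(s, n)]
--         c = cs[0]
--         if c <= s:
--             return build(s, cs[1:])
--         return [(s, c + 1)] + build(c + 1, cs[1:])
--
--     runs = build(0, changes)
--     return [r for r in runs[:-1] if r[1] - r[0] >= 32] + runs[-1:]
-- ===== Notes on version B (the rewrite author's own statement) =====
-- stated objective: alternative
-- what changed: B replaces A's direction-driven nested while loops entirely: it precomputes the boolean sequence up[i] = (lst[i+1] >= lst[i]) and its change points, then derives each run by jumping from change point to change point (a run starting at s ends at c+1 for the first change c > s, the next run starts at c+1), filtering non-final runs by length >= 32 afterwards; no ascending/descending case split or element comparison remains in the run-building phase.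
-- outside the precondition, e.g. on find_runs3([]): A returns [(0, 1)], B returns []
import Mathlib
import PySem

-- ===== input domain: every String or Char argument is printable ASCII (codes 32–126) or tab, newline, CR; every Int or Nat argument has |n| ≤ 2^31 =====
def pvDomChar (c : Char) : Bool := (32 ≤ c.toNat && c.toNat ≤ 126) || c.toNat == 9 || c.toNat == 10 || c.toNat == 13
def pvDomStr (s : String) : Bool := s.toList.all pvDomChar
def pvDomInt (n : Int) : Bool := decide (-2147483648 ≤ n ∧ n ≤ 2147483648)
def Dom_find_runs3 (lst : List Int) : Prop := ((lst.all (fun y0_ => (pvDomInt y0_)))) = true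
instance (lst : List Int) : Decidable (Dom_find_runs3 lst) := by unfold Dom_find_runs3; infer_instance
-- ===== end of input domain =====

-- B precomputes the pairwise comparison bits and their change points and derives the
-- runs by jumping between change points (then filters by length); A interleaves
-- direction-cased while loops with inline filtering.  Same O(n) cost.


-- ===== PORT A =====
-- A's inner ascending while-loop: extends `e` while lst[e] >= lst[e-1]; on break it
-- (conditionally) appends the run and restarts at start=e, e=e+1; on natural exit
-- (e = len) it returns the state unchanged.  State is (runs, start, e).
def innerAscA (lst : List Int) : Nat → List (Int × Int) → Nat → Nat →
    List (Int × Int) × Nat × Nat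
  | 0, runs, start, e => (runs, start, e)
  | fuel + 1, runs, start, e =>
    if e < lst.length then
      if lst.getD e 0 ≥ lst.getD (e - 1) 0 then
        innerAscA lst fuel runs start (e + 1)
      else
        ((if (e : Int) - (start : Int) ≥ 32 then runs ++ [((start : Int), (e : Int))] else runs),
         e, e + 1)
    else (runs, start, e)

-- A's inner descending while-loop (strict <), same shape.
def innerDescA (lst : List Int) : Nat → List (Int × Int) → Nat → Nat →
    List (Int × Int) × Nat × Nat
  | 0, runs, start, e => (runs, start, e)
  | fuel + 1, runs, start, e =>
    if e < lst.length then
      if lst.getD e 0 < lst.getD (e - 1) 0 then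
        innerDescA lst fuel runs start (e + 1)
      else
        ((if (e : Int) - (start : Int) ≥ 32 then runs ++ [((start : Int), (e : Int))] else runs),
         e, e + 1)
    else (runs, start, e)

-- A's outer while-loop: each iteration decides the direction from lst[e] vs lst[start],
-- runs exactly one of the two inner loops, then continues with the returned state;
-- on exit it appends the final (start, e).
def outerA (lst : List Int) : Nat → List (Int × Int) → Nat → Nat → List (Int × Int)
  | 0, runs, start, e => runs ++ [((start : Int), (e : Int))]
  | fuel + 1, runs, start, e =>
    if e < lst.length then
      if lst.getD e 0 ≥ lst.getD start 0 then
        let s := innerAscA lst fuel runs start e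
        outerA lst fuel s.1 s.2.1 s.2.2
      else
        let s := innerDescA lst fuel runs start e
        outerA lst fuel s.1 s.2.1 s.2.2
    else runs ++ [((start : Int), (e : Int))]

def find_runs3 (lst : List Int) : List (Int × Int) :=
  outerA lst (lst.length + 1) [] 0 1

-- ===== PORT B =====
-- B's run builder: walks the (sorted) change-point list, skipping change points
-- already consumed; a change point c > s closes the run (s, c+1) and the next run
-- starts at c+1; with no change point left the final run (s, n) closes the list.
def buildB (n : Nat) : Nat → List Nat → List (Int × Int)
  | s, [] => [((s : Int), (n : Int))]
  | s, c :: cs => if c ≤ s then buildB n s cs else ((s : Int), (c : Int) + 1) :: buildB n (c + 1) cs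

def find_runs3_alt (lst : List Int) : List (Int × Int) :=
  let n := lst.length
  if n = 0 then []
  else
    let up : List Bool := (List.range (n - 1)).map (fun i => decide (lst.getD (i + 1) 0 ≥ lst.getD i 0))
    let changes : List Nat := (List.range' 1 (n - 2)).filter (fun i => up.getD i false != up.getD (i - 1) false)
    let runs := buildB n 0 changes
    runs.dropLast.filter (fun r => r.2 - r.1 ≥ 32) ++ runs.drop (runs.length - 1)

-- ===== PRECONDITION & SPEC =====
-- Pre_ excludes only the empty list, which is outside A's documented
-- precondition "len(lst) > 0"; there A returns the spurious run [(0, 1)]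
-- while B naturally returns [].
def Pre_find_runs3 (lst : List Int) : Prop := lst ≠ []
instance (lst : List Int) : Decidable (Pre_find_runs3 lst) := by
  unfold Pre_find_runs3; infer_instance

def pvWitness_find_runs3 : List Int := [3, 1, 4, 1, 5]

def Spec_find_runs3 (lst : List Int) (out : List (Int × Int)) : Prop := out = find_runs3_alt lst
instance (lst : List Int) (out : List (Int × Int)) : Decidable (Spec_find_runs3 lst out) := by unfold Spec_find_runs3; infer_instance

-- ===== CLAIM (what is proved, stated in full; the proofs are below) =====
def Claim_equal_find_runs3 : Prop := ∀ (lst : List Int), Dom_find_runs3 lst → Pre_find_runs3 lst → Spec_find_runs3 lst (find_runs3 lst)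

-- ===== LEMMAS AND PROOFS =====

-- the final filtering pass, as a function of the run list (shared shape of both sides)
def gB (rs : List (Int × Int)) : List (Int × Int) :=
  rs.dropLast.filter (fun r => r.2 - r.1 ≥ 32) ++ rs.drop (rs.length - 1)

-- proof-side intermediate: a plain segmentation loop recording every maximal run
def extendAscB (lst : List Int) : Nat → Nat → Nat
  | 0, e => e
  | fuel + 1, e =>
    if e < lst.length ∧ lst.getD e 0 ≥ lst.getD (e - 1) 0 then extendAscB lst fuel (e + 1)
    else e

def extendDescB (lst : List Int) : Nat → Nat → Nat
  | 0, e => e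
  | fuel + 1, e =>
    if e < lst.length ∧ lst.getD e 0 < lst.getD (e - 1) 0 then extendDescB lst fuel (e + 1)
    else e

def segLoopB (lst : List Int) : Nat → List (Int × Int) → Nat → List (Int × Int)
  | 0, acc, _ => acc
  | fuel + 1, acc, start =>
    if start < lst.length then
      let e :=
        if start + 1 < lst.length then
          if lst.getD (start + 1) 0 ≥ lst.getD start 0 then extendAscB lst fuel (start + 1)
          else extendDescB lst fuel (start + 1)
        else start + 1
      segLoopB lst fuel (acc ++ [((start : Int), (e : Int))]) e
    else acc

-- the comparison bit of the pair (i, i+1), and the change points of the bit sequence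
def upI (lst : List Int) (i : Nat) : Bool := decide (lst.getD (i + 1) 0 ≥ lst.getD i 0)

def changesL (lst : List Int) : List Nat :=
  (List.range' 1 (lst.length - 2)).filter (fun i => upI lst i != upI lst (i - 1))

theorem gB_cons (a : Int × Int) (rs : List (Int × Int)) (h : rs ≠ []) :
    gB (a :: rs) = (if a.2 - a.1 ≥ 32 then [a] else []) ++ gB rs := by
  cases rs with
  | nil => simp at h
  | cons b t =>
    simp [gB, List.filter_cons]
    split <;> simp

theorem extendAscB_ge (lst : List Int) (fuel : Nat) :
    ∀ e, e ≤ extendAscB lst fuel e := by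
  induction fuel with
  | zero => intro e; simp [extendAscB]
  | succ fuel ih =>
      intro e
      rw [extendAscB]
      split
      · exact le_trans (Nat.le_succ e) (ih (e + 1))
      · exact le_rfl

theorem extendDescB_ge (lst : List Int) (fuel : Nat) :
    ∀ e, e ≤ extendDescB lst fuel e := by
  induction fuel with
  | zero => intro e; simp [extendDescB]
  | succ fuel ih =>
      intro e
      rw [extendDescB]
      split
      · exact le_trans (Nat.le_succ e) (ih (e + 1))
      · exact le_rfl

theorem extendAscB_pos (lst : List Int) (fuel e : Nat)
    (h : e < lst.length ∧ lst.getD e 0 ≥ lst.getD (e - 1) 0) :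
    extendAscB lst (fuel + 1) e = extendAscB lst fuel (e + 1) := by
  rw [extendAscB, if_pos h]

theorem extendAscB_neg (lst : List Int) (fuel e : Nat)
    (h : ¬ (e < lst.length ∧ lst.getD e 0 ≥ lst.getD (e - 1) 0)) :
    extendAscB lst (fuel + 1) e = e := by
  rw [extendAscB, if_neg h]

theorem extendDescB_pos (lst : List Int) (fuel e : Nat)
    (h : e < lst.length ∧ lst.getD e 0 < lst.getD (e - 1) 0) :
    extendDescB lst (fuel + 1) e = extendDescB lst fuel (e + 1) := by
  rw [extendDescB, if_pos h]

theorem extendDescB_neg (lst : List Int) (fuel e : Nat)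
    (h : ¬ (e < lst.length ∧ lst.getD e 0 < lst.getD (e - 1) 0)) :
    extendDescB lst (fuel + 1) e = e := by
  rw [extendDescB, if_neg h]

theorem segLoopB_exit (lst : List Int) (fuel : Nat) (acc : List (Int × Int)) (start : Nat)
    (h : ¬ start < lst.length) : segLoopB lst fuel acc start = acc := by
  cases fuel with
  | zero => rfl
  | succ fuel => rw [segLoopB, if_neg h]

theorem outerA_exit (lst : List Int) (fuel : Nat) (runs : List (Int × Int)) (start e : Nat)
    (h : ¬ e < lst.length) :
    outerA lst fuel runs start e = runs ++ [((start : Int), (e : Int))] := by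
  cases fuel with
  | zero => rfl
  | succ fuel => rw [outerA, if_neg h]

theorem segLoopB_acc (lst : List Int) (fuel : Nat) :
    ∀ acc start, segLoopB lst fuel acc start = acc ++ segLoopB lst fuel [] start := by
  induction fuel with
  | zero => intro acc start; simp [segLoopB]
  | succ fuel ih =>
      intro acc start
      by_cases hs : start < lst.length
      · rw [segLoopB, if_pos hs]
        conv_rhs => rw [segLoopB, if_pos hs]
        dsimp only
        rw [ih]
        conv_rhs => rw [ih]
        simp
      · rw [segLoopB_exit lst _ _ _ hs, segLoopB_exit lst _ _ _ hs]
        simp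

theorem segLoopB_ne_nil (lst : List Int) (fuel start : Nat)
    (h : start < lst.length) : segLoopB lst (fuel + 1) [] start ≠ [] := by
  rw [segLoopB, if_pos h]
  dsimp only
  rw [segLoopB_acc]
  simp

theorem innerAscA_spec (lst : List Int) (fuel : Nat) :
    ∀ runs start e, lst.length - e ≤ fuel →
    innerAscA lst fuel runs start e =
      (if extendAscB lst fuel e < lst.length then
         ((if ((extendAscB lst fuel e : Int)) - (start : Int) ≥ 32 then
             runs ++ [((start : Int), ((extendAscB lst fuel e : Int)))] else runs),
          extendAscB lst fuel e, extendAscB lst fuel e + 1)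
       else (runs, start, extendAscB lst fuel e)) := by
  induction fuel with
  | zero =>
      intro runs start e hf
      have hE : extendAscB lst 0 e = e := rfl
      rw [innerAscA, hE, if_neg (by omega)]
  | succ fuel ih =>
      intro runs start e hf
      by_cases hlt : e < lst.length
      · by_cases hc : lst.getD e 0 ≥ lst.getD (e - 1) 0
        · rw [innerAscA, if_pos hlt, if_pos hc, extendAscB_pos lst fuel e ⟨hlt, hc⟩]
          exact ih runs start (e + 1) (by omega)
        · rw [innerAscA, if_pos hlt, if_neg hc,
            extendAscB_neg lst fuel e (fun hcon => hc hcon.2), if_pos hlt]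
      · rw [innerAscA, if_neg hlt,
          extendAscB_neg lst fuel e (fun hcon => hlt hcon.1), if_neg hlt]

theorem innerDescA_spec (lst : List Int) (fuel : Nat) :
    ∀ runs start e, lst.length - e ≤ fuel →
    innerDescA lst fuel runs start e =
      (if extendDescB lst fuel e < lst.length then
         ((if ((extendDescB lst fuel e : Int)) - (start : Int) ≥ 32 then
             runs ++ [((start : Int), ((extendDescB lst fuel e : Int)))] else runs),
          extendDescB lst fuel e, extendDescB lst fuel e + 1)
       else (runs, start, extendDescB lst fuel e)) := by
  induction fuel with
  | zero =>
      intro runs start e hf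
      have hE : extendDescB lst 0 e = e := rfl
      rw [innerDescA, hE, if_neg (by omega)]
  | succ fuel ih =>
      intro runs start e hf
      by_cases hlt : e < lst.length
      · by_cases hc : lst.getD e 0 < lst.getD (e - 1) 0
        · rw [innerDescA, if_pos hlt, if_pos hc, extendDescB_pos lst fuel e ⟨hlt, hc⟩]
          exact ih runs start (e + 1) (by omega)
        · rw [innerDescA, if_pos hlt, if_neg hc,
            extendDescB_neg lst fuel e (fun hcon => hc hcon.2), if_pos hlt]
      · rw [innerDescA, if_neg hlt,
          extendDescB_neg lst fuel e (fun hcon => hlt hcon.1), if_neg hlt]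

-- A's outer loop from (start, start+1) produces the filtered segmentation from start
theorem outerA_eq_aux (lst : List Int) (fuel : Nat) :
    ∀ start runs, lst.length - start < fuel → start < lst.length →
      outerA lst fuel runs start (start + 1) = runs ++ gB (segLoopB lst fuel [] start) := by
  induction fuel with
  | zero => intro start runs h hs; omega
  | succ fuel ih =>
      intro start runs h hs
      by_cases h1 : start + 1 < lst.length
      · conv_rhs => rw [segLoopB, if_pos hs]
        rw [if_pos h1]
        by_cases hasc : lst.getD (start + 1) 0 ≥ lst.getD start 0
        · rw [if_pos hasc]
          dsimp only
          rw [segLoopB_acc]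
          simp only [List.nil_append, List.singleton_append]
          set e' := extendAscB lst fuel (start + 1) with he'
          have hge : start + 1 ≤ e' := extendAscB_ge lst fuel (start + 1)
          by_cases h2 : e' < lst.length
          · obtain ⟨f', hf'⟩ : ∃ f', fuel = f' + 1 := ⟨fuel - 1, by omega⟩
            rw [gB_cons _ _ (hf' ▸ segLoopB_ne_nil lst f' e' h2)]
            rw [outerA, if_pos h1, if_pos hasc,
              innerAscA_spec lst fuel runs start (start + 1) (by omega), ← he', if_pos h2]
            dsimp only
            rw [ih e' _ (by omega) h2]
            split_ifs <;> simp
          · rw [outerA, if_pos h1, if_pos hasc,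
              innerAscA_spec lst fuel runs start (start + 1) (by omega), ← he', if_neg h2]
            dsimp only
            rw [outerA_exit lst fuel _ _ _ h2, segLoopB_exit lst fuel _ _ h2]
            simp [gB]
        · rw [if_neg hasc]
          dsimp only
          rw [segLoopB_acc]
          simp only [List.nil_append, List.singleton_append]
          set e' := extendDescB lst fuel (start + 1) with he'
          have hge : start + 1 ≤ e' := extendDescB_ge lst fuel (start + 1)
          by_cases h2 : e' < lst.length
          · obtain ⟨f', hf'⟩ : ∃ f', fuel = f' + 1 := ⟨fuel - 1, by omega⟩
            rw [gB_cons _ _ (hf' ▸ segLoopB_ne_nil lst f' e' h2)]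
            rw [outerA, if_pos h1, if_neg hasc,
              innerDescA_spec lst fuel runs start (start + 1) (by omega), ← he', if_pos h2]
            dsimp only
            rw [ih e' _ (by omega) h2]
            split_ifs <;> simp
          · rw [outerA, if_pos h1, if_neg hasc,
              innerDescA_spec lst fuel runs start (start + 1) (by omega), ← he', if_neg h2]
            dsimp only
            rw [outerA_exit lst fuel _ _ _ h2, segLoopB_exit lst fuel _ _ h2]
            simp [gB]
      · rw [outerA, if_neg h1]
        conv_rhs => rw [segLoopB, if_pos hs]
        rw [if_neg h1]
        dsimp only
        rw [segLoopB_acc, segLoopB_exit lst fuel _ _ h1]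
        simp [gB]

-- membership in the change-point list, spelled out
theorem mem_changesL (lst : List Int) (c : Nat) :
    c ∈ changesL lst ↔ (1 ≤ c ∧ c + 1 < lst.length ∧ upI lst c ≠ upI lst (c - 1)) := by
  unfold changesL
  rw [List.mem_filter, List.mem_range'_1]
  constructor
  · rintro ⟨⟨h1, h2⟩, h3⟩
    refine ⟨h1, by omega, by simpa using h3⟩
  · rintro ⟨h1, h2, h3⟩
    exact ⟨⟨h1, by omega⟩, by simpa using h3⟩

theorem changesL_pairwise (lst : List Int) : (changesL lst).Pairwise (· < ·) := by
  unfold changesL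
  exact (show (List.range' 1 (lst.length - 2)).Pairwise (· < ·) by
      simpa using List.pairwise_lt_range' (s := 1) (n := lst.length - 2)).sublist
    List.filter_sublist

-- buildB skips an initial segment of already-consumed change points
theorem buildB_skip (n s : Nat) :
    ∀ l1 l2, (∀ c ∈ l1, c ≤ s) → buildB n s (l1 ++ l2) = buildB n s l2 := by
  intro l1
  induction l1 with
  | nil => intro l2 _; rfl
  | cons c t ih =>
      intro l2 h
      rw [List.cons_append, buildB, if_pos (h c List.mem_cons_self)]
      exact ih l2 (fun x hx => h x (List.mem_cons_of_mem _ hx))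

-- characterization of the ascending extension loop via the bit sequence
theorem extendAscB_char (lst : List Int) (fuel : Nat) :
    ∀ e, lst.length - e ≤ fuel → 1 ≤ e → e ≤ lst.length →
      e ≤ extendAscB lst fuel e ∧ extendAscB lst fuel e ≤ lst.length ∧
      (∀ j, e ≤ j + 1 → j + 1 < extendAscB lst fuel e → upI lst j = true) ∧
      (extendAscB lst fuel e = lst.length ∨ upI lst (extendAscB lst fuel e - 1) = false) := by
  induction fuel with
  | zero =>
      intro e hf h1 h2
      have : extendAscB lst 0 e = e := rfl
      rw [this]
      exact ⟨le_rfl, h2, fun j hj1 hj2 => by omega, Or.inl (by omega)⟩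
  | succ fuel ih =>
      intro e hf h1 h2
      by_cases hc : e < lst.length ∧ lst.getD e 0 ≥ lst.getD (e - 1) 0
      · rw [extendAscB_pos lst fuel e hc]
        obtain ⟨i1, i2, i3, i4⟩ := ih (e + 1) (by omega) (by omega) (by omega)
        refine ⟨by omega, i2, ?_, i4⟩
        intro j hj1 hj2
        by_cases hje : j + 1 = e
        · have hj : j = e - 1 := by omega
          have he1 : e - 1 + 1 = e := by omega
          simp only [upI, hj, he1]
          exact decide_eq_true hc.2
        · exact i3 j (by omega) hj2
      · rw [extendAscB_neg lst fuel e hc]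
        refine ⟨le_rfl, h2, fun j hj1 hj2 => by omega, ?_⟩
        by_cases he : e < lst.length
        · right
          have hcond : ¬ lst.getD e 0 ≥ lst.getD (e - 1) 0 := fun h => hc ⟨he, h⟩
          have he1 : e - 1 + 1 = e := by omega
          simp only [upI, he1]
          simpa using hcond
        · left; omega

theorem extendDescB_char (lst : List Int) (fuel : Nat) :
    ∀ e, lst.length - e ≤ fuel → 1 ≤ e → e ≤ lst.length →
      e ≤ extendDescB lst fuel e ∧ extendDescB lst fuel e ≤ lst.length ∧
      (∀ j, e ≤ j + 1 → j + 1 < extendDescB lst fuel e → upI lst j = false) ∧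
      (extendDescB lst fuel e = lst.length ∨ upI lst (extendDescB lst fuel e - 1) = true) := by
  induction fuel with
  | zero =>
      intro e hf h1 h2
      have : extendDescB lst 0 e = e := rfl
      rw [this]
      exact ⟨le_rfl, h2, fun j hj1 hj2 => by omega, Or.inl (by omega)⟩
  | succ fuel ih =>
      intro e hf h1 h2
      by_cases hc : e < lst.length ∧ lst.getD e 0 < lst.getD (e - 1) 0
      · rw [extendDescB_pos lst fuel e hc]
        obtain ⟨i1, i2, i3, i4⟩ := ih (e + 1) (by omega) (by omega) (by omega)
        refine ⟨by omega, i2, ?_, i4⟩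
        intro j hj1 hj2
        by_cases hje : j + 1 = e
        · have hj : j = e - 1 := by omega
          have he1 : e - 1 + 1 = e := by omega
          simp only [upI, hj, he1]
          exact decide_eq_false (not_le.mpr hc.2)
        · exact i3 j (by omega) hj2
      · rw [extendDescB_neg lst fuel e hc]
        refine ⟨le_rfl, h2, fun j hj1 hj2 => by omega, ?_⟩
        by_cases he : e < lst.length
        · right
          have hcond : ¬ lst.getD e 0 < lst.getD (e - 1) 0 := fun h => hc ⟨he, h⟩
          have he1 : e - 1 + 1 = e := by omega
          simp only [upI, he1]
          simpa using not_lt.mp hcond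
        · left; omega

-- the run-step facts for the endpoint chosen by the segmentation loop
theorem endpoint_facts (lst : List Int) (fuel s : Nat)
    (h1 : s + 1 < lst.length) (hf : lst.length - (s + 1) ≤ fuel) :
    let E := if lst.getD (s + 1) 0 ≥ lst.getD s 0 then extendAscB lst fuel (s + 1)
             else extendDescB lst fuel (s + 1)
    s + 1 < E ∧ E ≤ lst.length ∧
    (∀ j, s ≤ j → j + 1 < E → upI lst j = upI lst s) ∧
    (E = lst.length ∨ upI lst (E - 1) ≠ upI lst s) := by
  intro E
  have hsup : upI lst s = decide (lst.getD (s + 1) 0 ≥ lst.getD s 0) := by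
    simp [upI]
  by_cases hd : lst.getD (s + 1) 0 ≥ lst.getD s 0
  · have hEdef : E = extendAscB lst fuel (s + 1) := if_pos hd
    have hds : upI lst s = true := by rw [hsup]; exact decide_eq_true hd
    obtain ⟨i1, i2, i3, i4⟩ := extendAscB_char lst fuel (s + 1) hf (by omega) (by omega)
    rw [← hEdef] at i1 i2 i3 i4
    have hne : s + 1 ≠ E := by
      intro hEe
      rcases i4 with h | h
      · omega
      · rw [← hEe] at h
        simp only [Nat.add_sub_cancel] at h
        rw [hds] at h
        exact absurd h (by simp)
    refine ⟨by omega, i2, ?_, ?_⟩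
    · intro j hj1 hj2
      rw [hds]; exact i3 j (by omega) hj2
    · rcases i4 with h | h
      · exact Or.inl h
      · right; rw [h, hds]; simp
  · have hEdef : E = extendDescB lst fuel (s + 1) := if_neg hd
    have hds : upI lst s = false := by rw [hsup]; simpa using hd
    obtain ⟨i1, i2, i3, i4⟩ := extendDescB_char lst fuel (s + 1) hf (by omega) (by omega)
    rw [← hEdef] at i1 i2 i3 i4
    have hne : s + 1 ≠ E := by
      intro hEe
      rcases i4 with h | h
      · omega
      · rw [← hEe] at h
        simp only [Nat.add_sub_cancel] at h
        rw [hds] at h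
        exact absurd h (by simp)
    refine ⟨by omega, i2, ?_, ?_⟩
    · intro j hj1 hj2
      rw [hds]; exact i3 j (by omega) hj2
    · rcases i4 with h | h
      · exact Or.inl h
      · right; rw [h, hds]; simp

-- the segmentation loop produces exactly B's change-point run list
theorem seg_eq_build (lst : List Int) (fuel : Nat) :
    ∀ s, lst.length - s < fuel → s < lst.length →
      segLoopB lst fuel [] s = buildB lst.length s (changesL lst) := by
  induction fuel with
  | zero => intro s h hs; omega
  | succ fuel ih =>
      intro s h hs
      by_cases h1 : s + 1 < lst.length
      · rw [segLoopB, if_pos hs, if_pos h1]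
        dsimp only
        obtain ⟨e1, e2, e3, e4⟩ := endpoint_facts lst fuel s h1 (by omega)
        set E := if lst.getD (s + 1) 0 ≥ lst.getD s 0 then extendAscB lst fuel (s + 1)
                 else extendDescB lst fuel (s + 1) with hE
        -- split the change list at the first unconsumed change point
        have hsplit := List.takeWhile_append_dropWhile (p := fun c => decide (c ≤ s)) (l := changesL lst)
        have htw : ∀ c ∈ (changesL lst).takeWhile (fun c => decide (c ≤ s)), c ≤ s := by
          intro c hc
          simpa using List.mem_takeWhile_imp hc
        -- no change point strictly between s and E - 1
        have hnone : ∀ c ∈ changesL lst, s < c → E - 1 ≤ c := by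
          intro c hc hsc
          by_contra hlt
          obtain ⟨hc1, hc2, hc3⟩ := (mem_changesL lst c).mp hc
          have hu1 : upI lst c = upI lst s := e3 c (by omega) (by omega)
          have hu2 : upI lst (c - 1) = upI lst s := by
            have := e3 (c - 1) (by omega) (by omega)
            simpa [Nat.sub_add_cancel hc1] using this
          exact hc3 (hu1.trans hu2.symm)
        cases hdw : (changesL lst).dropWhile (fun c => decide (c ≤ s)) with
        | nil =>
            -- every change point is ≤ s : the run reaches the end of the list
            have hall : ∀ c ∈ changesL lst, c ≤ s := by
              intro c hc
              rw [← hsplit] at hc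
              rcases List.mem_append.mp hc with hc | hc
              · exact htw c hc
              · rw [hdw] at hc; simp at hc
            have hEn : E = lst.length := by
              rcases e4 with hE' | hE'
              · exact hE'
              · by_contra hne
                have hmem : E - 1 ∈ changesL lst := by
                  rw [mem_changesL]
                  refine ⟨by omega, by omega, ?_⟩
                  have hu2 : upI lst (E - 1 - 1) = upI lst s := by
                    have := e3 (E - 2) (by omega) (by omega)
                    have h22 : E - 1 - 1 = E - 2 := by omega
                    rw [h22]; exact this
                  have h11 : E - 1 - 1 + 1 = E - 1 := by omega
                  rw [hu2]
                  exact fun hcon => hE' hcon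
                have := hall _ hmem
                omega
            rw [hEn, segLoopB_exit lst fuel _ _ (by omega)]
            have : buildB lst.length s (changesL lst) = buildB lst.length s [] := by
              have := buildB_skip lst.length s (changesL lst) [] hall
              simpa using this
            rw [this, buildB]
            simp
        | cons c0 rest =>
            -- c0 is the first change point > s ; it closes the run at E = c0 + 1
            have hc0mem : c0 ∈ changesL lst := by
              have : c0 ∈ (changesL lst).dropWhile (fun c => decide (c ≤ s)) := by
                rw [hdw]; exact List.mem_cons_self
              exact ((changesL lst).dropWhile_sublist _).mem this
            have hc0s : s < c0 := by
              have := List.head?_dropWhile_not (fun c => decide (c ≤ s)) (changesL lst)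
              rw [hdw] at this
              simp at this
              omega
            obtain ⟨hc01, hc02, hc03⟩ := (mem_changesL lst c0).mp hc0mem
            have hEc0 : E = c0 + 1 := by
              have hge : E - 1 ≤ c0 := hnone c0 hc0mem hc0s
              have hEn : E < lst.length := by
                by_contra hEn
                have hEl : E = lst.length := by omega
                -- then no change point > s exists, contradicting c0
                have : E - 1 ≤ c0 := hge
                omega
              -- E - 1 is itself a change point > s, and c0 is the least one
              have hmem : E - 1 ∈ changesL lst := by
                rw [mem_changesL]
                refine ⟨by omega, by omega, ?_⟩
                have hu1 : upI lst (E - 1) ≠ upI lst s := by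
                  rcases e4 with h' | h'
                  · omega
                  · exact h'
                have hu2 : upI lst (E - 1 - 1) = upI lst s := by
                  have := e3 (E - 2) (by omega) (by omega)
                  have h22 : E - 1 - 1 = E - 2 := by omega
                  rw [h22]; exact this
                rw [hu2]; exact hu1
              -- E - 1 is in the dropWhile part, whose head is c0 and which is sorted
              have hEin : E - 1 ∈ c0 :: rest := by
                rw [← hdw]
                rcases List.mem_append.mp (hsplit ▸ hmem) with hmem' | hmem'
                · have := htw _ hmem'; omega
                · exact hmem'
              have hsorted : (c0 :: rest).Pairwise (· < ·) := by
                have hsub : (List.dropWhile (fun c => decide (c ≤ s)) (changesL lst)).Sublist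
                    (changesL lst) := List.dropWhile_sublist _
                have := (changesL_pairwise lst).sublist hsub
                rwa [hdw] at this
              rcases List.mem_cons.mp hEin with h' | h'
              · omega
              · have := (List.pairwise_cons.mp hsorted).1 _ h'
                omega
            -- both sides take the step (s, c0+1) and continue from c0 + 1
            rw [segLoopB_acc, hEc0]
            have hrec : segLoopB lst fuel [] (c0 + 1) = buildB lst.length (c0 + 1) (changesL lst) := by
              exact ih (c0 + 1) (by omega) (by omega)
            have hbuild : buildB lst.length s (changesL lst) =
                ((s : Int), ((c0 : Int) + 1)) :: buildB lst.length (c0 + 1) rest := by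
              rw [← hsplit, hdw, buildB_skip lst.length s _ _ htw, buildB, if_neg (by omega)]
            have hbuild2 : buildB lst.length (c0 + 1) (changesL lst) =
                buildB lst.length (c0 + 1) rest := by
              have hsp2 : changesL lst =
                  ((changesL lst).takeWhile (fun c => decide (c ≤ s)) ++ [c0]) ++ rest := by
                rw [List.append_assoc, List.singleton_append, ← hdw, hsplit]
              rw [hsp2]
              apply buildB_skip
              intro c hc
              rcases List.mem_append.mp hc with hc | hc
              · have := htw c hc; omega
              · simp at hc; omega
            rw [hrec, hbuild, hbuild2]
            have hc0cast : ((c0 + 1 : Nat) : Int) = (c0 : Int) + 1 := by push_cast; ring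
            rw [hc0cast]
            rfl
      · -- a single trailing element: the last run is (s, s+1) and all change points are ≤ s
        rw [segLoopB, if_pos hs, if_neg h1]
        dsimp only
        rw [segLoopB_exit lst fuel _ _ (by omega)]
        have hall : ∀ c ∈ changesL lst, c ≤ s := by
          intro c hc
          obtain ⟨hc1, hc2, _⟩ := (mem_changesL lst c).mp hc
          omega
        have : buildB lst.length s (changesL lst) = buildB lst.length s [] := by
          have := buildB_skip lst.length s (changesL lst) [] hall
          simpa using this
        rw [this, buildB]
        have : lst.length = s + 1 := by omega
        rw [this]
        simp

-- the change list computed inside B's port is changesL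
theorem port_changes_eq (lst : List Int) :
    ((List.range' 1 (lst.length - 2)).filter (fun i =>
        ((List.range (lst.length - 1)).map (fun i => decide (lst.getD (i + 1) 0 ≥ lst.getD i 0))).getD i false
        != ((List.range (lst.length - 1)).map (fun i => decide (lst.getD (i + 1) 0 ≥ lst.getD i 0))).getD (i - 1) false))
      = changesL lst := by
  unfold changesL
  apply List.filter_congr
  intro i hi
  rw [List.mem_range'_1] at hi
  have hgetD : ∀ j, j < lst.length - 1 →
      ((List.range (lst.length - 1)).map (fun i => decide (lst.getD (i + 1) 0 ≥ lst.getD i 0))).getD j false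
        = upI lst j := by
    intro j hj
    rw [List.getD_eq_getElem?_getD, List.getElem?_map, List.getElem?_range hj]
    rfl
  rw [hgetD i (by omega), hgetD (i - 1) (by omega)]

-- ===== VERDICT (by name: the statement is the Claim_ definition above) =====
theorem find_runs3_spec : Claim_equal_find_runs3 := by
  intro lst _ hpre
  have hlen : 0 < lst.length := List.length_pos_iff.mpr hpre
  show find_runs3 lst = find_runs3_alt lst
  unfold find_runs3 find_runs3_alt
  rw [if_neg (by omega)]
  dsimp only
  rw [port_changes_eq lst]
  have hA := outerA_eq_aux lst (lst.length + 1) 0 [] (by omega) hlen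
  have hseg := seg_eq_build lst (lst.length + 1) 0 (by omega) hlen
  rw [hseg] at hA
  simpa [gB] using hA
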